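-- pv_equiv track=rewrite | github.com/dongkyu92/TIL | Python/BACKJOON/(1157)단어 공부.py | solution
-- ===== SOURCE A (Python) =====
-- from collections import defaultdict, Counter
--
-- def solution(words):
--     answer = ''
--     dic = defaultdict(int)
--     words = words.upper()
--     for word in words:
--         if word not in words:
--             dic[word] = 1
--         else:
--             dic[word] += 1
--     if len(dic) > 1 and Counter(dic).most_common(2)[0][1] == Counter(dic).most_common(2)[1][1]:
--         answer = '?'
--     else:
--         answer = Counter(dic).most_common(1)[0][0].upper()
--     return answer
-- ===== SOURCE B (Python) =====
-- def solution(words):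
--     freq = {}
--     for ch in words.upper():
--         freq[ch] = freq.get(ch, 0) + 1
--     items = list(freq.items())
--     best_char, best_count = items[0]
--     tie = False
--     for ch, cnt in items[1:]:
--         if cnt > best_count:
--             best_char, best_count = ch, cnt
--             tie = False
--         elif cnt == best_count:
--             tie = True
--     return '?' if tie else best_char
-- ===== Notes on version B (the rewrite author's own statement) =====
-- stated objective: simpler
-- what changed: Replaces A's defaultdict loop with a dead always-false membership branch plus three Counter.most_common sorting calls by one plain dict count and a single linear max-finding scan with a tie flag (reset on strict improvement).
import Mathlib
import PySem

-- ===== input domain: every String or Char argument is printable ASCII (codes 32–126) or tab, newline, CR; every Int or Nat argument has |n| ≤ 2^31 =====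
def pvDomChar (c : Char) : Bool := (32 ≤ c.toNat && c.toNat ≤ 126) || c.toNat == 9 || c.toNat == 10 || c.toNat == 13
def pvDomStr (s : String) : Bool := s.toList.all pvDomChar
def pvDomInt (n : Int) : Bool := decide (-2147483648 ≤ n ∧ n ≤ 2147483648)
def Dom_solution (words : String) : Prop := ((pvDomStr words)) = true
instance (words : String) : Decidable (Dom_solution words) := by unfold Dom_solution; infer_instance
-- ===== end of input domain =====

-- B replaces A's three Counter.most_common sorting passes by one linear max-finding
-- scan with a tie flag (objective: simpler).

-- ===== PORT A =====
-- A: count the chars of words.upper() (the 'word not in words' branch exists in A's code but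
-- is never taken, each char being drawn from words itself); then compare the two largest
-- counts of the stable sort by count descending (= Counter.most_common).
def solution (words : String) : String :=
  let ws := PySem.Str.upper words
  let dic : PySem.Dict Char Int := ws.toList.foldl (fun d c =>
      if PySem.Str.isIn (String.ofList [c]) ws = false then d.insert c 1
      else d.insert c (d.getD c 0 + 1)) PySem.Dict.empty
  let mc := PySem.List.sorted dic.items (fun p => p.2) true    -- Counter(dic).most_common
  match mc with
  | [] => ""                 -- Python raises IndexError here (words = "", outside Pre_)
  | p0 :: rest =>
    if dic.size > 1 ∧ (rest[0]?).map (·.2) = some p0.2 then "?"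
    else String.ofList (PySem.Chars.upper [p0.1])

-- ===== PORT B =====
def solution_alt (words : String) : String :=
  let freq : PySem.Dict Char Int := (PySem.Str.upper words).toList.foldl
      (fun d c => d.insert c (d.getD c 0 + 1)) PySem.Dict.empty
  match freq.items with
  | [] => ""                 -- Python raises IndexError here (words = "", outside Pre_)
  | (c0, n0) :: rest =>
    let st := rest.foldl (fun (st : Char × Int × Bool) p =>
        if p.2 > st.2.1 then (p.1, p.2, false)
        else if p.2 = st.2.1 then (st.1, st.2.1, true)
        else st) (c0, n0, false)
    if st.2.2 then "?" else String.ofList [st.1]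

-- ===== PRECONDITION & SPEC =====
-- Python A raises IndexError on the empty string (most_common(1)[0]); Pre_ excludes exactly words = "".
def Pre_solution (words : String) : Prop := words ≠ ""
instance (words : String) : Decidable (Pre_solution words) := by unfold Pre_solution; infer_instance
def pvWitness_solution : String := "aAbB?"
def Spec_solution (words : String) (out : String) : Prop := out = solution_alt words
instance (words : String) (out : String) : Decidable (Spec_solution words out) := by unfold Spec_solution; infer_instance

-- ===== CLAIM (what is proved, stated in full; the proofs are below) =====
def Claim_equal_solution : Prop := ∀ (words : String), Dom_solution words → Pre_solution words → Spec_solution words (solution words)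

-- ===== LEMMAS AND PROOFS =====

-- B's scan step (the lambda in solution_alt), named for the proofs
def pvStep (st : Char × Int × Bool) (p : Char × Int) : Char × Int × Bool :=
  if p.2 > st.2.1 then (p.1, p.2, false)
  else if p.2 = st.2.1 then (st.1, st.2.1, true)
  else st

-- invariant of B's scan over the processed prefix: the state holds an element of the
-- prefix whose count is maximal, and the tie flag says the maximum is attained twice
def pvInv (pre : List (Char × Int)) (st : Char × Int × Bool) : Prop :=
  (st.1, st.2.1) ∈ pre ∧ (∀ p ∈ pre, p.2 ≤ st.2.1) ∧
    (st.2.2 = true ↔ 2 ≤ pre.countP (fun p => decide (p.2 = st.2.1)))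

theorem pvStep_preserves (pre : List (Char × Int)) (st : Char × Int × Bool)
    (p : Char × Int) (h : pvInv pre st) : pvInv (pre ++ [p]) (pvStep st p) := by
  obtain ⟨hmem, hub, htie⟩ := h
  unfold pvStep
  split_ifs with h1 h2
  · refine ⟨by simp, ?_, ?_⟩
    · intro q hq
      rcases List.mem_append.mp hq with hq | hq
      · exact le_of_lt (lt_of_le_of_lt (hub q hq) h1)
      · simp at hq; simp [hq]
    · have hz : pre.countP (fun q => decide (q.2 = p.2)) = 0 := by
        rw [List.countP_eq_zero]
        intro q hq
        simp only [decide_eq_true_eq]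
        exact fun he => absurd h1 (by rw [← he]; exact not_lt.mpr (hub q hq))
      simp [List.countP_append, hz]
  · refine ⟨List.mem_append_left _ hmem, ?_, ?_⟩
    · intro q hq
      rcases List.mem_append.mp hq with hq | hq
      · exact hub q hq
      · simp at hq; simp [hq, h2]
    · simp [List.countP_append, h2]
      exact ⟨st.1, hmem⟩
  · refine ⟨List.mem_append_left _ hmem, ?_, ?_⟩
    · intro q hq
      rcases List.mem_append.mp hq with hq | hq
      · exact hub q hq
      · simp at hq; subst hq; omega
    · have hz : (p.2 = st.2.1) = False := by simp; exact h2
      simp [List.countP_append, hz]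
      exact htie

theorem pvFold (q : List (Char × Int)) : ∀ (pre : List (Char × Int)) (st : Char × Int × Bool),
    pvInv pre st → pvInv (pre ++ q) (q.foldl pvStep st) := by
  induction q with
  | nil => intro pre st h; simpa using h
  | cons p q ih =>
      intro pre st h
      have h' := pvStep_preserves pre st p h
      have := ih (pre ++ [p]) (pvStep st p) h'
      simpa [List.append_assoc] using this

-- A's tie test (second sorted count equals the first) says: the maximal count is attained twice
theorem pvTieA (l : List (Char × Int)) (p0 : Char × Int) (rest : List (Char × Int))
    (hs : PySem.List.sorted l (fun p => p.2) true = p0 :: rest) :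
    ((1 < l.length ∧ (rest[0]?).map (·.2) = some p0.2) ↔
      2 ≤ l.countP (fun p => decide (p.2 = p0.2))) := by
  have hperm : (p0 :: rest).Perm l := by
    rw [← hs]; exact PySem.List.sorted_perm l (fun p => p.2) true
  have hpw : (p0 :: rest).Pairwise (fun a b => b.2 ≤ a.2) := by
    rw [← hs]; exact PySem.List.sorted_pairwise_rev l (fun p => p.2)
  have hcnt := hperm.countP_eq (fun p => decide (p.2 = p0.2))
  have hlen := hperm.length_eq
  constructor
  · rintro ⟨hlen1, heq⟩
    cases rest with
    | nil => simp at heq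
    | cons q t =>
      simp only [List.getElem?_cons_zero, Option.map_some] at heq
      have hq : q.2 = p0.2 := Option.some.inj heq
      rw [← hcnt]
      simp [hq]
  · intro h2
    rw [← hcnt] at h2
    cases rest with
    | nil => simp at h2
    | cons q t =>
      rw [List.pairwise_cons] at hpw
      obtain ⟨hrel, hpw'⟩ := hpw
      rw [List.pairwise_cons] at hpw'
      obtain ⟨hrelq, _⟩ := hpw'
      have hx : ∃ x ∈ q :: t, x.2 = p0.2 := by
        have hcc : (p0 :: q :: t).countP (fun p => decide (p.2 = p0.2)) =
            (q :: t).countP (fun p => decide (p.2 = p0.2)) + 1 := by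
          rw [List.countP_cons]; simp
        have : 0 < (q :: t).countP (fun p => decide (p.2 = p0.2)) := by omega
        obtain ⟨x, hx, hpx⟩ := List.countP_pos_iff.mp this
        exact ⟨x, hx, by simpa using hpx⟩
      have hq : q.2 = p0.2 := by
        obtain ⟨x, hx, hx2⟩ := hx
        rcases List.mem_cons.mp hx with h | h
        · rw [← h]; exact hx2
        · exact le_antisymm (hrel q (by simp)) (hx2 ▸ hrelq x h)
      constructor
      · rw [← hlen]; simp
      · simp [hq]

-- a predicate counted at most once holds of at most one element (as a value)
theorem pvUniq (l : List (Char × Int)) (pred : Char × Int → Bool) (a b : Char × Int)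
    (ha : a ∈ l) (hb : b ∈ l) (hpa : pred a = true) (hpb : pred b = true)
    (h1 : l.countP pred ≤ 1) : a = b := by
  by_contra hne
  have hperm := List.perm_cons_erase ha
  have hb' : b ∈ l.erase a := (List.mem_erase_of_ne (fun h => hne h.symm)).mpr hb
  have h2 : 0 < (l.erase a).countP pred := List.countP_pos_iff.mpr ⟨b, hb', hpb⟩
  have := hperm.countP_eq pred
  simp [hpa] at this
  omega

theorem pvIslower_iff (c : Char) : PySem.Chars.islower c = true ↔ 97 ≤ c.toNat ∧ c.toNat ≤ 122 := by
  unfold PySem.Chars.islower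
  simp only [Bool.and_eq_true, decide_eq_true_eq, Char.le_def, UInt32.le_iff_toNat_le]
  rfl

theorem pvUpperChar_idem (c : Char) :
    PySem.Chars.upperChar (PySem.Chars.upperChar c) = PySem.Chars.upperChar c := by
  unfold PySem.Chars.upperChar
  split_ifs with h1 h2
  · exfalso
    rw [pvIslower_iff] at h1 h2
    rw [Char.toNat_ofNat, if_pos] at h2
    · omega
    · left; omega
  · rfl
  · rfl

-- ===== VERDICT (by name: the statement is the Claim_ definition above) =====
theorem pvKeysFixed (words : String) :
    ∀ p ∈ (PySem.Dict.counter (PySem.Str.upper words).toList).items,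
      PySem.Chars.upperChar p.1 = p.1 := by
  intro p hp
  rw [PySem.Dict.items_counter] at hp
  obtain ⟨k, hk', rfl⟩ := List.mem_map.mp hp
  have hmem : k ∈ (PySem.Str.upper words).toList := (PySem.Set.mem_ofList _ _).mp hk'
  have hup : (PySem.Str.upper words).toList = words.toList.map PySem.Chars.upperChar := by
    simp [PySem.Chars.upper]
  rw [hup] at hmem
  obtain ⟨d, _, rfl⟩ := List.mem_map.mp hmem
  exact pvUpperChar_idem d

theorem pvSel (l : List (Char × Int))
    (hk : ∀ p ∈ l, PySem.Chars.upperChar p.1 = p.1) :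
    (match PySem.List.sorted l (fun p => p.2) true with
      | [] => ""
      | p0 :: rest =>
        if l.length > 1 ∧ (rest[0]?).map (·.2) = some p0.2 then "?"
        else String.ofList (PySem.Chars.upper [p0.1]))
    = (match l with
      | [] => ""
      | (c0, n0) :: rest =>
        if (rest.foldl pvStep (c0, n0, false)).2.2 then "?"
        else String.ofList [(rest.foldl pvStep (c0, n0, false)).1]) := by
  rcases hsort : PySem.List.sorted l (fun p => p.2) true with _ | ⟨p0, rest'⟩
  · have hnil : l = [] := (PySem.List.sorted_eq_nil_iff l (fun p => p.2) true).mp hsort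
    rw [hnil]
  · have hlne : l ≠ [] := by
      intro h
      rw [h] at hsort
      have hh : ([] : List (Char × Int)) = p0 :: rest' := hsort
      cases hh
    rcases l with _ | ⟨⟨c0, n0⟩, tl⟩
    · exact absurd rfl hlne
    change (if ((c0, n0) :: tl).length > 1 ∧ (rest'[0]?).map (·.2) = some p0.2 then "?"
        else String.ofList (PySem.Chars.upper [p0.1]))
      = (if (tl.foldl pvStep (c0, n0, false)).2.2 then "?"
        else String.ofList [(tl.foldl pvStep (c0, n0, false)).1])
    have hInv : pvInv ((c0, n0) :: tl) (tl.foldl pvStep (c0, n0, false)) := by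
      have h0 : pvInv [(c0, n0)] (c0, n0, false) := ⟨by simp, by simp, by simp⟩
      simpa using pvFold tl [(c0, n0)] (c0, n0, false) h0
    obtain ⟨hmem, hub, htie⟩ := hInv
    have hp0mem : p0 ∈ (c0, n0) :: tl := by
      have := (PySem.List.mem_sorted ((c0, n0) :: tl) (fun p => p.2) true p0).mp
      rw [hsort] at this
      exact this List.mem_cons_self
    have hmax := PySem.List.key_head_sorted_rev_ge ((c0, n0) :: tl) (fun p => p.2) hsort
    set st := tl.foldl pvStep (c0, n0, false) with hst
    have hM : st.2.1 = p0.2 := le_antisymm (hmax _ hmem) (hub p0 hp0mem)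
    have htieA := pvTieA ((c0, n0) :: tl) p0 rest' hsort
    by_cases htop : 2 ≤ ((c0, n0) :: tl).countP (fun p => decide (p.2 = p0.2))
    · rw [if_pos (htieA.mpr htop)]
      have hT : st.2.2 = true := htie.mpr (by rw [hM]; exact htop)
      rw [if_pos hT]
    · rw [if_neg (fun hc => htop (htieA.mp hc))]
      have hfalse : st.2.2 = false := by
        rcases hb : st.2.2 with _ | _
        · rfl
        · exfalso
          have h2' := htie.mp hb
          rw [hM] at h2'
          exact htop h2'
      rw [if_neg (by simp [hfalse])]
      have huniq : p0 = (st.1, st.2.1) :=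
        pvUniq ((c0, n0) :: tl) (fun p => decide (p.2 = p0.2)) p0 (st.1, st.2.1)
          hp0mem hmem (by simp) (by simp [hM]) (by omega)
      have h1 : st.1 = p0.1 := by rw [huniq]
      rw [h1]
      have hupp : PySem.Chars.upper [p0.1] = [PySem.Chars.upperChar p0.1] := by
        simp [PySem.Chars.upper]
      rw [hupp, hk p0 hp0mem]

theorem solution_spec : Claim_equal_solution := by
  intro words _ _
  unfold Spec_solution
  have hfold : (PySem.Str.upper words).toList.foldl (fun (d : PySem.Dict Char Int) c =>
      if PySem.Str.isIn (String.ofList [c]) (PySem.Str.upper words) = false then d.insert c 1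
      else d.insert c (d.getD c 0 + 1)) PySem.Dict.empty
      = PySem.Dict.counter (PySem.Str.upper words).toList := by
    rw [PySem.List.foldl_congr_mem _ _ (fun (d : PySem.Dict Char Int) c => d.insert c (d.getD c 0 + 1)) _ ?_]
    · exact PySem.Dict.foldl_insert_getD_add_one_eq_counter _
    · intro d c hc
      have hin : PySem.Chars.isIn [c] (PySem.Chars.upper words.toList) = true := by
        rw [PySem.Chars.isIn_iff_infix, List.singleton_infix_iff]
        simpa using hc
      simp [PySem.Str.isIn, hin]
  simp only [solution, solution_alt]
  rw [hfold, PySem.Dict.foldl_insert_getD_add_one_eq_counter]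
  simp only [PySem.Dict.size]
  exact pvSel _ (pvKeysFixed words)
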